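-- pv_equiv track=rewrite | github.com/FinemechanicPub/problems | yandex_trainig_7/part_4/solution_h.py | process
-- ===== SOURCE A (Python) =====
-- def process(n: int, operations: list[tuple[str, int, int]]) -> list[str]:
--     parent = list(range(n))
--     size = [1] * n
--
--     def find(node: int):
--         if parent[node] != node:
--             parent[node] = find(parent[node])
--         return parent[node]
--
--     def union(node_a: int, node_b: int):
--         parent_a = find(node_a)
--         parent_b = find(node_b)
--         if parent_a == parent_b:
--             return
--         if size[parent_a] > size[parent_b]:
--             parent_a, parent_b = parent_b, parent_a
--         parent[parent_a] = parent_b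
--         size[parent_b] += size[parent_a]
--         return size[parent_b]
--
--     answers = []
--     for operation, node_a, node_b in reversed(operations):
--         if operation == "cut":
--             union(node_a - 1, node_b - 1)
--         elif operation == "ask":
--             answers.append(
--                 "YES" if find(node_a - 1) == find(node_b - 1) else "NO"
--             )
--     return answers[::-1]
-- ===== SOURCE B (Python) =====
-- def process(n: int, operations: list[tuple[str, int, int]]) -> list[str]:
--     parent = list(range(n))
--     size = [1] * n
--
--     def find(x: int) -> int:
--         # pass 1: walk to the root, collecting the nodes on the way
--         path = []
--         while parent[x] != x:
--             path.append(x)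
--             x = parent[x]
--         # pass 2: point every collected node straight at the root
--         for node in path:
--             parent[node] = x
--         return x
--
--     answers = []
--     for operation, a, b in reversed(operations):
--         if operation == "cut":
--             ra, rb = find(a - 1), find(b - 1)
--             if ra != rb:
--                 if size[ra] <= size[rb]:
--                     parent[ra] = rb
--                     size[rb] += size[ra]
--                 else:
--                     parent[rb] = ra
--                     size[ra] += size[rb]
--         elif operation == "ask":
--             answers.append("YES" if find(a - 1) == find(b - 1) else "NO")
--     answers.reverse()
--     return answers
-- ===== Notes on version B (the rewrite author's own statement) =====
-- stated objective: alternative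
-- what changed: The recursive path-compressing find is replaced by an iterative two-pass routine (walk to the root collecting the path, then repoint every collected node at the root), and the union helper with early return and tuple swap is inlined as a symmetric two-branch size comparison; the reverse offline union-find scheme itself is kept.
import Mathlib
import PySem

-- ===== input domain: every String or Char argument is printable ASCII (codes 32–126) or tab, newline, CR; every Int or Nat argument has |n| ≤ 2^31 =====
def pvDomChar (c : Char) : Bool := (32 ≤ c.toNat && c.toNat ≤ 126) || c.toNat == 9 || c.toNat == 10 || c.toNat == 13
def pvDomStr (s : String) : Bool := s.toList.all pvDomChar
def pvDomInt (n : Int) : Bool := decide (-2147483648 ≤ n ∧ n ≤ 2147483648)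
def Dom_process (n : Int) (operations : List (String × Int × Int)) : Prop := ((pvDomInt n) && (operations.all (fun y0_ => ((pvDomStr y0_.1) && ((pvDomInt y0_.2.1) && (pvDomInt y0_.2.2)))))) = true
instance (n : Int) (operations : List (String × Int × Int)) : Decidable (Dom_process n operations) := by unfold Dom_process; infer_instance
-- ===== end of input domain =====

-- B rewrites the recursive path-compressing find as an iterative two-pass routine (collect the
-- path, then repoint it at the root) and inlines union as a symmetric two-branch block; same
-- reverse offline union-find otherwise, equal return values on Pre_ (no speed claim).

-- Shared array primitives: Python list indexing l[i] / l[i] = v with a possibly negative index.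
-- Exact for -len ≤ i < len, which Pre_ guarantees for every index either program uses
-- (out of range Python raises IndexError; these total forms are only used under Pre_).
def normI (len : Nat) (i : Int) : Nat := (if i < 0 then i + len else i).toNat
def rd (par : List Int) (i : Int) : Int := par.getD (normI par.length i) 0
def wr (par : List Int) (i : Int) (v : Int) : List Int := par.set (normI par.length i) v

-- ===== PORT A =====
-- recursive find with path compression; fuel = parent.length bounds the recursion depth
-- (the parent array built by the operations is a forest, so any parent chain has at most
--  parent.length edges and the fuel case `0` is never the one that answers under Pre_)
def findA : Nat → List Int → Int → List Int × Int
  | 0, par, node => (par, node)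
  | f+1, par, node =>
    if rd par node ≠ node then
      let res := findA f par (rd par node)
      let par2 := wr res.1 node res.2
      (par2, rd par2 node)
    else (par, rd par node)

-- union(a, b): two finds, early return on equal roots, swap by size, link and add sizes
def unionA (par size : List Int) (a b : Int) : List Int × List Int :=
  let r1 := findA par.length par a
  let r2 := findA r1.1.length r1.1 b
  if r1.2 = r2.2 then (r2.1, size)
  else
    let pq := if rd size r1.2 > rd size r2.2 then (r2.2, r1.2) else (r1.2, r2.2)
    (wr r2.1 pq.1 pq.2, wr size pq.2 (rd size pq.2 + rd size pq.1))

def stepA (st : List Int × List Int × List String) (op : String × Int × Int) :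
    List Int × List Int × List String :=
  if op.1 = "cut" then
    let u := unionA st.1 st.2.1 (op.2.1 - 1) (op.2.2 - 1)
    (u.1, u.2, st.2.2)
  else if op.1 = "ask" then
    let r1 := findA st.1.length st.1 (op.2.1 - 1)
    let r2 := findA r1.1.length r1.1 (op.2.2 - 1)
    (r2.1, st.2.1, st.2.2 ++ [if r1.2 = r2.2 then "YES" else "NO"])
  else st

def process (n : Int) (operations : List (String × Int × Int)) : List String :=
  let parent := (List.range n.toNat).map Int.ofNat       -- list(range(n))
  let size := List.replicate n.toNat (1 : Int)           -- [1] * n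
  (operations.reverse.foldl stepA (parent, size, [])).2.2.reverse  -- answers[::-1]

-- ===== PORT B =====
-- pass 1 of the iterative find: walk to the root, collecting the nodes on the way
def walkB : Nat → List Int → Int → List Int → List Int × Int
  | 0, _, x, path => (path, x)
  | f+1, par, x, path =>
    if rd par x ≠ x then walkB f par (rd par x) (path ++ [x]) else (path, x)

-- pass 2: point every collected node straight at the root
def findB (par : List Int) (x : Int) : List Int × Int :=
  let w := walkB par.length par x []
  (w.1.foldl (fun l c => wr l c w.2) par, w.2)

def stepB (st : List Int × List Int × List String) (op : String × Int × Int) :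
    List Int × List Int × List String :=
  if op.1 = "cut" then
    let r1 := findB st.1 (op.2.1 - 1)
    let r2 := findB r1.1 (op.2.2 - 1)
    if r1.2 ≠ r2.2 then
      if rd st.2.1 r1.2 ≤ rd st.2.1 r2.2 then
        (wr r2.1 r1.2 r2.2, wr st.2.1 r2.2 (rd st.2.1 r2.2 + rd st.2.1 r1.2), st.2.2)
      else
        (wr r2.1 r2.2 r1.2, wr st.2.1 r1.2 (rd st.2.1 r1.2 + rd st.2.1 r2.2), st.2.2)
    else (r2.1, st.2.1, st.2.2)
  else if op.1 = "ask" then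
    let r1 := findB st.1 (op.2.1 - 1)
    let r2 := findB r1.1 (op.2.2 - 1)
    (r2.1, st.2.1, st.2.2 ++ [if r1.2 = r2.2 then "YES" else "NO"])
  else st

def process_alt (n : Int) (operations : List (String × Int × Int)) : List String :=
  let parent := (List.range n.toNat).map Int.ofNat
  let size := List.replicate n.toNat (1 : Int)
  (operations.reverse.foldl stepB (parent, size, [])).2.2.reverse

-- ===== PRECONDITION & SPEC =====
-- Exactly the inputs on which the Python A returns: every "cut"/"ask" operation must carry
-- 1-based node numbers whose index a-1 lies in Python's valid range [-n, n) (negative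
-- wraparound included); outside, list indexing raises IndexError in both A and B.
def Pre_process (n : Int) (operations : List (String × Int × Int)) : Prop :=
  ∀ op ∈ operations, (op.1 = "cut" ∨ op.1 = "ask") →
    1 - n ≤ op.2.1 ∧ op.2.1 ≤ n ∧ 1 - n ≤ op.2.2 ∧ op.2.2 ≤ n
instance (n : Int) (operations : List (String × Int × Int)) : Decidable (Pre_process n operations) := by
  unfold Pre_process; infer_instance

def pvWitness_process : Int × (List (String × Int × Int)) :=
  (3, [("ask", 1, 2), ("cut", 1, 2), ("ask", 1, 2), ("ask", 2, 3)])

def Spec_process (n : Int) (operations : List (String × Int × Int)) (out : List String) : Prop := out = process_alt n operations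
instance (n : Int) (operations : List (String × Int × Int)) (out : List String) : Decidable (Spec_process n operations out) := by unfold Spec_process; infer_instance

-- ===== CLAIM (what is proved, stated in full; the proofs are below) =====
def Claim_equal_process : Prop := ∀ (n : Int) (operations : List (String × Int × Int)), Dom_process n operations → Pre_process n operations → Spec_process n operations (process n operations)

-- ===== LEMMAS AND PROOFS =====

-- all parent entries are valid non-negative indices
def GoodRange (par : List Int) : Prop := ∀ v ∈ par, 0 ≤ v ∧ v < par.length

lemma wr_length (par : List Int) (i v : Int) : (wr par i v).length = par.length := by
  simp [wr]

lemma rd_range (par : List Int) (x : Int) (hg : GoodRange par) (h0 : 0 < par.length) :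
    0 ≤ rd par x ∧ rd par x < par.length := by
  unfold rd List.getD
  rcases h : par[normI par.length x]? with _ | v
  · simpa using h0
  · exact hg v (List.mem_of_getElem? h)

lemma set_set_same (l : List Int) (a b : Nat) (v : Int) :
    (l.set a v).set b v = (l.set b v).set a v := by
  rcases eq_or_ne a b with rfl | hab
  · rfl
  · exact (List.set_comm _ _ hab.symm).symm

lemma wr_wr_comm (par : List Int) (a b v : Int) :
    wr (wr par a v) b v = wr (wr par b v) a v := by
  simp only [wr, List.length_set]
  exact set_set_same par (normI par.length a) (normI par.length b) v

lemma foldl_wr_length (path : List Int) (par : List Int) (r : Int) :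
    (path.foldl (fun l c => wr l c r) par).length = par.length := by
  induction path generalizing par with
  | nil => rfl
  | cons c t ih => simpa [wr_length] using ih (wr par c r)

lemma foldl_wr_comm (path : List Int) (par : List Int) (x r : Int) :
    path.foldl (fun l c => wr l c r) (wr par x r)
      = wr (path.foldl (fun l c => wr l c r) par) x r := by
  induction path generalizing par with
  | nil => rfl
  | cons c t ih =>
      simp only [List.foldl_cons]
      rw [wr_wr_comm, ih]

lemma walkB_acc (f : Nat) (par : List Int) (x : Int) (acc : List Int) :
    walkB f par x acc = (acc ++ (walkB f par x []).1, (walkB f par x []).2) := by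
  induction f generalizing x acc with
  | zero => simp [walkB]
  | succ f ih =>
      simp only [walkB]
      by_cases h : rd par x ≠ x
      · simp only [if_pos h]
        rw [ih (rd par x) (acc ++ [x]), ih (rd par x) ([] ++ [x])]
        simp
      · simp [if_neg h]

lemma walkB_root_range (f : Nat) (par : List Int) (x : Int) (acc : List Int)
    (hg : GoodRange par) (h0 : 0 < par.length)
    (hx : (0 ≤ x ∧ x < par.length) ∨ f ≠ 0) :
    0 ≤ (walkB f par x acc).2 ∧ (walkB f par x acc).2 < par.length := by
  induction f generalizing x acc with
  | zero =>
      rcases hx with hx | hx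
      · simpa [walkB] using hx
      · exact absurd rfl hx
  | succ f ih =>
      simp only [walkB]
      by_cases h : rd par x ≠ x
      · simp only [if_pos h]
        exact ih (rd par x) (acc ++ [x]) (Or.inl (rd_range par x hg h0))
      · simp only [if_neg h]
        rw [not_ne_iff] at h
        have := rd_range par x hg h0
        rw [h] at this
        simpa using this

lemma rd_wr_self (par : List Int) (x v : Int) (hx : normI par.length x < par.length) :
    rd (wr par x v) x = v := by
  unfold rd wr
  simp only [List.length_set]
  rw [List.getD_eq_getElem _ _ (by simpa using hx)]
  exact List.getElem_set_self _

-- KEY: the recursive find equals "walk to the root, then write the root into every path cell"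
lemma find_eq (f : Nat) (par : List Int) (x : Int)
    (hg : GoodRange par) (h0 : 0 < par.length)
    (hx : normI par.length x < par.length) :
    findA f par x
      = ((walkB f par x []).1.foldl (fun l c => wr l c (walkB f par x []).2) par,
         (walkB f par x []).2) := by
  induction f generalizing par x with
  | zero => simp [findA, walkB]
  | succ f ih =>
      by_cases h : rd par x ≠ x
      · have hp := rd_range par x hg h0
        have hpi : normI par.length (rd par x) < par.length := by
          unfold normI; omega
        have hwalk : walkB (f+1) par x []
            = (x :: (walkB f par (rd par x) []).1, (walkB f par (rd par x) []).2) := by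
          simp only [walkB, if_pos h]
          rw [walkB_acc f par (rd par x) ([] ++ [x])]
          simp
        rw [hwalk]
        simp only [findA, if_pos h]
        rw [ih par (rd par x) hg h0 hpi]
        simp only [List.foldl_cons]
        rw [foldl_wr_comm]
        have hlen : ((walkB f par (rd par x) []).1.foldl
            (fun l c => wr l c (walkB f par (rd par x) []).2) par).length = par.length :=
          foldl_wr_length _ _ _
        refine Prod.ext rfl ?_
        exact rd_wr_self _ x _ (by rw [hlen]; exact hx)
      · rw [not_ne_iff] at h
        simp [findA, walkB, h]

-- GoodRange is preserved by writing an in-range value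
lemma goodRange_wr (par : List Int) (i v : Int)
    (hg : GoodRange par) (hv : 0 ≤ v ∧ v < par.length) :
    GoodRange (wr par i v) := by
  intro u hu
  rw [wr_length]
  rcases List.mem_or_eq_of_mem_set hu with hu' | rfl
  · exact hg u hu'
  · exact hv

lemma goodRange_foldl_wr (path : List Int) (par : List Int) (r : Int)
    (hg : GoodRange par) (hr : 0 ≤ r ∧ r < par.length) :
    GoodRange (path.foldl (fun l c => wr l c r) par) := by
  induction path generalizing par with
  | nil => exact hg
  | cons c t ih =>
      simp only [List.foldl_cons]
      exact ih (wr par c r) (goodRange_wr par c r hg hr) (by simpa [wr_length] using hr)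

lemma findB_good (par : List Int) (x : Int) (hg : GoodRange par) (h0 : 0 < par.length) :
    GoodRange (findB par x).1 ∧ (findB par x).1.length = par.length
      ∧ 0 ≤ (findB par x).2 ∧ (findB par x).2 < par.length := by
  have hr := walkB_root_range par.length par x [] hg h0 (Or.inr (by omega))
  refine ⟨goodRange_foldl_wr _ _ _ hg hr, foldl_wr_length _ _ _, hr⟩

-- one step of the two main loops agrees and preserves the invariant
lemma step_eq (n : Int) (op : String × Int × Int) (par size : List Int) (ans : List String)
    (hg : GoodRange par) (hlen : (par.length : Int) = n.toNat)
    (hop : (op.1 = "cut" ∨ op.1 = "ask") →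
      1 - n ≤ op.2.1 ∧ op.2.1 ≤ n ∧ 1 - n ≤ op.2.2 ∧ op.2.2 ≤ n) :
    stepA (par, size, ans) op = stepB (par, size, ans) op
      ∧ GoodRange (stepA (par, size, ans) op).1
      ∧ ((stepA (par, size, ans) op).1.length : Int) = n.toNat := by
  obtain ⟨o, a, b⟩ := op
  by_cases hc : o = "cut"
  · have hb := hop (Or.inl hc)
    simp only at hb
    have h0 : 0 < par.length := by omega
    have ha1 : normI par.length (a - 1) < par.length := by unfold normI; split <;> omega
    have hb1 : normI par.length (b - 1) < par.length := by unfold normI; split <;> omega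
    have e1 : findA par.length par (a - 1) = findB par (a - 1) := by
      rw [find_eq par.length par (a - 1) hg h0 ha1]; rfl
    have g1 := findB_good par (a - 1) hg h0
    have h0' : 0 < (findB par (a - 1)).1.length := by rw [g1.2.1]; exact h0
    have e2 : findA (findB par (a - 1)).1.length (findB par (a - 1)).1 (b - 1)
        = findB (findB par (a - 1)).1 (b - 1) := by
      rw [find_eq _ _ (b - 1) g1.1 h0' (by rw [g1.2.1]; exact hb1)]; rfl
    have g2 := findB_good (findB par (a - 1)).1 (b - 1) g1.1 h0'
    simp only [stepA, stepB, unionA, hc, if_pos]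
    rw [e1, e2]
    set r1 := findB par (a - 1) with hr1
    set r2 := findB r1.1 (b - 1) with hr2
    by_cases hr : r1.2 = r2.2
    · simp only [hr, if_pos, ne_eq, not_true_eq_false, if_false]
      refine ⟨by trivial, g2.1, by rw [g2.2.1, g1.2.1]; exact hlen⟩
    · have hwr : ∀ (p q : Int), 0 ≤ q → q < r2.1.length →
          GoodRange (wr r2.1 p q) ∧ ((wr r2.1 p q).length : Int) = n.toNat := by
        intro p q h1 h2
        exact ⟨goodRange_wr r2.1 p q g2.1 ⟨h1, h2⟩,
          by rw [wr_length, g2.2.1, g1.2.1]; exact hlen⟩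
      have hra : 0 ≤ r1.2 ∧ r1.2 < r2.1.length := by
        rw [g2.2.1, g1.2.1]; exact ⟨g1.2.2.1, g1.2.2.2⟩
      have hrb : 0 ≤ r2.2 ∧ r2.2 < r2.1.length := by
        rw [g2.2.1]; exact ⟨g2.2.2.1, g2.2.2.2⟩
      by_cases hs : rd size r1.2 > rd size r2.2
      · have hs' : ¬ rd size r1.2 ≤ rd size r2.2 := by omega
        simp only [ne_eq, hr, not_false_eq_true, if_pos, reduceIte,
          if_pos hs, if_neg hs']
        exact ⟨by trivial, (hwr r2.2 r1.2 hra.1 hra.2).1, (hwr r2.2 r1.2 hra.1 hra.2).2⟩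
      · have hs' : rd size r1.2 ≤ rd size r2.2 := by omega
        simp only [ne_eq, hr, not_false_eq_true, if_pos, reduceIte,
          if_neg hs, if_pos hs']
        exact ⟨by trivial, (hwr r1.2 r2.2 hrb.1 hrb.2).1, (hwr r1.2 r2.2 hrb.1 hrb.2).2⟩
  · by_cases hk : o = "ask"
    · have hb := hop (Or.inr hk)
      simp only at hb
      have h0 : 0 < par.length := by omega
      have ha1 : normI par.length (a - 1) < par.length := by unfold normI; split <;> omega
      have hb1 : normI par.length (b - 1) < par.length := by unfold normI; split <;> omega
      have e1 : findA par.length par (a - 1) = findB par (a - 1) := by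
        rw [find_eq par.length par (a - 1) hg h0 ha1]; rfl
      have g1 := findB_good par (a - 1) hg h0
      have h0' : 0 < (findB par (a - 1)).1.length := by rw [g1.2.1]; exact h0
      have e2 : findA (findB par (a - 1)).1.length (findB par (a - 1)).1 (b - 1)
          = findB (findB par (a - 1)).1 (b - 1) := by
        rw [find_eq _ _ (b - 1) g1.1 h0' (by rw [g1.2.1]; exact hb1)]; rfl
      have g2 := findB_good (findB par (a - 1)).1 (b - 1) g1.1 h0'
      simp only [stepA, stepB, hk, String.reduceEq, reduceIte]
      rw [e1, e2]
      exact ⟨by trivial, g2.1, by rw [g2.2.1, g1.2.1]; exact hlen⟩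
    · simp only [stepA, stepB, if_neg hc, if_neg hk]
      exact ⟨by trivial, hg, hlen⟩

-- the two main loops agree and the answers lists stay equal
lemma loop_eq (n : Int) (l : List (String × Int × Int)) :
    ∀ (par size : List Int) (ans : List String),
    GoodRange par → (par.length : Int) = n.toNat →
    (∀ op ∈ l, (op.1 = "cut" ∨ op.1 = "ask") →
      1 - n ≤ op.2.1 ∧ op.2.1 ≤ n ∧ 1 - n ≤ op.2.2 ∧ op.2.2 ≤ n) →
    l.foldl stepA (par, size, ans) = l.foldl stepB (par, size, ans) := by
  induction l with
  | nil => intros; rfl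
  | cons op t ih =>
      intro par size ans hg hlen hpre
      obtain ⟨hAB, hg', hlen'⟩ :=
        step_eq n op par size ans hg hlen (hpre op (List.mem_cons_self))
      simp only [List.foldl_cons]
      rw [← hAB]
      exact ih (stepA (par, size, ans) op).1 (stepA (par, size, ans) op).2.1
        (stepA (par, size, ans) op).2.2 hg' hlen'
        (fun o ho => hpre o (List.mem_cons_of_mem _ ho))

-- ===== VERDICT (by name: the statement is the Claim_ definition above) =====
theorem process_spec : Claim_equal_process := by
  intro n operations _ hpre
  unfold Spec_process process process_alt
  dsimp only
  have hg : GoodRange ((List.range n.toNat).map Int.ofNat) := by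
    intro v hv
    simp only [List.mem_map, List.mem_range] at hv
    obtain ⟨i, hi, rfl⟩ := hv
    simp only [List.length_map, List.length_range]
    exact ⟨Int.natCast_nonneg i, Int.ofNat_lt.mpr hi⟩
  have hlen : ((((List.range n.toNat).map Int.ofNat)).length : Int) = n.toNat := by simp
  rw [loop_eq n operations.reverse _ _ [] hg hlen
    (fun op ho => hpre op (List.mem_reverse.mp ho))]
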